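-- pv_equiv track=rewrite | github.com/Staffanox/Coding_Challenges | src/switch_on_gravity.py | switch_gravity_on
-- ===== SOURCE A (Python) =====
-- def switch_gravity_on(lst):
--     for i in range(len(lst)):
--         for j in range(len(lst[i])):
--             y_pos = len(lst) - 1
--             if lst[i][j] == '#':
--                 lst[i][j] = '-'
--                 while True:
--                     if lst[y_pos][j] == '#':
--                         y_pos -= 1
--                         if y_pos < 0:
--                             lst[0][j] = '#'
--                             break
--                     else:
--                         lst[y_pos][j] = '#'
--                         break
--     return lst
-- ===== SOURCE B (Python) =====
-- # Gravity by counting: one pass counts the '#' rocks per column, a second pass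
-- # rewrites each cell from the closed form (bottom cnt[j] cells of column j are
-- # '#', former rock cells become '-', everything else is kept).
-- # Note: A settles the grid IN PLACE and returns it; B leaves the input
-- # untouched and returns a new grid -- the equivalence is about the return value.
-- def switch_gravity_on(lst):
--     n = len(lst)
--     cnt = {}
--     for row in lst:
--         for j, cell in enumerate(row):
--             if cell == '#':
--                 cnt[j] = cnt.get(j, 0) + 1
--     return [['#' if n - cnt.get(j, 0) <= i else '-' if cell == '#' else cell
--              for j, cell in enumerate(row)]
--             for i, row in enumerate(lst)]
-- ===== Notes on version B (the rewrite author's own statement) =====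
-- stated objective: alternative
-- what changed: A settles each rock individually with a bottom-up scan of its column inside a triple-nested loop; B makes one counting pass (rocks per column) and then rewrites every cell from the closed form: the bottom cnt[j] cells of column j are '#', former rock cells become '-', everything else is kept.
import Mathlib
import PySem

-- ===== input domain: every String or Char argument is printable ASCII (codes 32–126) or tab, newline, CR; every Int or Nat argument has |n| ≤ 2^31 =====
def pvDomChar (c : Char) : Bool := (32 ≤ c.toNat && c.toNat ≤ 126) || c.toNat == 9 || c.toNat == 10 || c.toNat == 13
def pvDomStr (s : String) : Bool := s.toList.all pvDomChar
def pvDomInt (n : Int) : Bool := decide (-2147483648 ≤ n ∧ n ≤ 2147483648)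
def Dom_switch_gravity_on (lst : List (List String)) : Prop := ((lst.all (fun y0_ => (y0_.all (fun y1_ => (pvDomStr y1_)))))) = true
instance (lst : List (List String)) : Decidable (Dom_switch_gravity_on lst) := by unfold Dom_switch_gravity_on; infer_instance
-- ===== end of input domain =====

-- B replaces A's per-rock bottom-up settling scans by one counting pass per column and a
-- closed-form rewrite of every cell; A mutates its argument in place, B builds a new grid,
-- so the equivalence proved here is about the RETURN value only.

-- ===== PORT A =====
-- lst[i][j] read/write; exact while the indices are in range (Pre_ guarantees every access A makes is)
def pvCell (g : List (List String)) (i j : Nat) : String := (g.getD i []).getD j ""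
def pvSet (g : List (List String)) (i j : Nat) (v : String) : List (List String) :=
  g.set i ((g.getD i []).set j v)

-- the 'while True' scan: y_pos walks down from len(lst)-1 looking for a non-'#' cell;
-- at y_pos = 0 both branches of the Python end up writing lst[0][j] = '#'
def dropA (g : List (List String)) (j : Nat) : Nat → List (List String)
  | 0 => if pvCell g 0 j = "#" then pvSet g 0 j "#" else pvSet g 0 j "#"
  | (y+1) => if pvCell g (y+1) j = "#" then dropA g j y else pvSet g (y+1) j "#"

-- body of the inner loop for one cell (i, j)
def stepA (g : List (List String)) (i j : Nat) : List (List String) :=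
  if pvCell g i j = "#" then dropA (pvSet g i j "-") j (g.length - 1) else g

def switch_gravity_on (lst : List (List String)) : List (List String) :=
  (List.range lst.length).foldl (fun g i =>
    (List.range (g.getD i []).length).foldl (fun g' jj => stepA g' i jj) g) lst

-- ===== PORT B =====
-- the counting pass: cnt[j] = cnt.get(j, 0) + 1 for every '#' cell (j, cell) of each row
def pvCntB (lst : List (List String)) : PySem.Dict Int Int :=
  lst.foldl (fun d row =>
    (PySem.List.enumerate row).foldl (fun d' p =>
      if p.2 = "#" then d'.modify p.1 0 (· + 1) else d') d) PySem.Dict.empty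

def switch_gravity_on_alt (lst : List (List String)) : List (List String) :=
  (PySem.List.enumerate lst).map (fun q =>
    (PySem.List.enumerate q.2).map (fun p =>
      if (lst.length : Int) - (pvCntB lst).getD p.1 0 ≤ q.1 then "#" else if p.2 = "#" then "-" else p.2))

-- ===== PRECONDITION & SPEC =====
-- Pre_ excludes ragged grids in which some column holding a '#' rock is not full height:
-- on those A's bottom-up scan may hit a missing cell (IndexError) or, depending on the
-- dynamic state, still return; '#'-free ragged grids and rectangular grids are all admitted.
def Pre_switch_gravity_on (lst : List (List String)) : Prop :=
  ∀ r ∈ lst, ∀ j < r.length, r.getD j "" = "#" → ∀ r' ∈ lst, j < r'.length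
instance (lst : List (List String)) : Decidable (Pre_switch_gravity_on lst) := by
  unfold Pre_switch_gravity_on; infer_instance

def pvWitness_switch_gravity_on : List (List String) :=
  [["#", "-"], ["-", "#"], ["-", "-"]]

def Spec_switch_gravity_on (lst : List (List String)) (out : List (List String)) : Prop := out = switch_gravity_on_alt lst
instance (lst : List (List String)) (out : List (List String)) : Decidable (Spec_switch_gravity_on lst out) := by unfold Spec_switch_gravity_on; infer_instance

-- ===== CLAIM (what is proved, stated in full; the proofs are below) =====
def Claim_equal_switch_gravity_on : Prop := ∀ (lst : List (List String)), Dom_switch_gravity_on lst → Pre_switch_gravity_on lst → Spec_switch_gravity_on lst (switch_gravity_on lst)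

-- ===== LEMMAS AND PROOFS =====

-- ---- column model: everything A does happens inside one column at a time ----
def fCell (x : String) : String := if x = "#" then "-" else x
def colOf (g : List (List String)) (j : Nat) : List String := g.map (fun r => r.getD j "")
def rowLen (g : List (List String)) (i : Nat) : Nat := (g.getD i []).length

def dropC : List String → Nat → List String
  | c, 0 => c.set 0 "#"
  | c, (y+1) => if c.getD (y+1) "" = "#" then dropC c y else c.set (y+1) "#"

def stepC (c : List String) (i : Nat) : List String :=
  if c.getD i "" = "#" then dropC (c.set i "-") (c.length - 1) else c

def procC (c : List String) : List String := (List.range c.length).foldl stepC c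

def gravC (c : List String) : List String :=
  (c.take (c.length - c.count "#")).map fCell ++ List.replicate (c.count "#") "#"

-- ---- basic lengths ----
lemma dropC_length (c : List String) (y : Nat) : (dropC c y).length = c.length := by
  induction y generalizing c with
  | zero => simp [dropC]
  | succ y ih => simp only [dropC]; split <;> simp [ih]

lemma stepC_length (c : List String) (i : Nat) : (stepC c i).length = c.length := by
  unfold stepC; split <;> simp [dropC_length]

-- ---- column-level facts ----
lemma getD_set_self (c : List String) (i : Nat) (v : String) (h : i < c.length) :
    (c.set i v).getD i "" = v := by
  rw [List.getD_eq_getElem _ "" (by simpa using h)]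
  exact List.getElem_set_self (by simpa using h)

lemma getD_set_ne (c : List String) (i i' : Nat) (v : String) (h : i ≠ i') :
    (c.set i v).getD i' "" = c.getD i' "" := by
  rw [List.getD_eq_getElem?_getD, List.getD_eq_getElem?_getD, List.getElem?_set_ne h]

lemma pvSet_cons_zero (r : List String) (g : List (List String)) (j : Nat) (v : String) :
    pvSet (r :: g) 0 j v = r.set j v :: g := by
  simp [pvSet]

lemma pvSet_cons_succ (r : List String) (g : List (List String)) (i j : Nat) (v : String) :
    pvSet (r :: g) (i + 1) j v = r :: pvSet g i j v := by
  simp [pvSet, List.set_cons_succ]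

lemma dropC_cons (x : String) (c : List String) (y : Nat)
    (h : ∃ z ≤ y, c.getD z "" ≠ "#") :
    dropC (x :: c) (y + 1) = x :: dropC c y := by
  induction y with
  | zero =>
    obtain ⟨z, hz, hne⟩ := h
    interval_cases z
    simp only [dropC, List.getD_cons_succ]
    rw [if_neg hne]; rfl
  | succ y ih =>
    simp only [dropC, List.getD_cons_succ]
    by_cases hc : c.getD (y + 1) "" = "#"
    · rw [if_pos hc, if_pos hc]
      apply ih
      obtain ⟨z, hz, hne⟩ := h
      refine ⟨z, ?_, hne⟩
      rcases Nat.lt_or_ge z (y+1) with h'|h'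
      · omega
      · exfalso
        have hz1 : z = y + 1 := by omega
        exact hne (hz1 ▸ hc)
    · rw [if_neg hc, if_neg hc]; rfl

lemma stepC_cons (x : String) (c : List String) (i : Nat) (hi : i < c.length) :
    stepC (x :: c) (i + 1) = x :: stepC c i := by
  unfold stepC
  simp only [List.getD_cons_succ, List.length_cons, Nat.add_sub_cancel]
  by_cases hc : c.getD i "" = "#"
  · rw [if_pos hc, if_pos hc, List.set_cons_succ]
    have hlen : c.length = (c.length - 1) + 1 := by omega
    have hwit : ∃ z ≤ c.length - 1, (c.set i "-").getD z "" ≠ "#" := by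
      refine ⟨i, by omega, ?_⟩
      rw [getD_set_self c i "-" hi]
      decide
    calc dropC (x :: c.set i "-") c.length
        = dropC (x :: c.set i "-") ((c.length - 1) + 1) := by rw [← hlen]
      _ = x :: dropC (c.set i "-") (c.length - 1) := dropC_cons _ _ _ hwit
  · rw [if_neg hc, if_neg hc]

lemma stepC_noop (c : List String) (i : Nat) (h : c.getD i "" ≠ "#") : stepC c i = c := by
  unfold stepC; rw [if_neg h]

lemma dropC_all_hash (c : List String) (y : Nat)
    (h : ∀ z, 0 < z → z ≤ y → c.getD z "" = "#") : dropC c y = c.set 0 "#" := by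
  induction y with
  | zero => rfl
  | succ y ih =>
    simp only [dropC]
    rw [if_pos (h (y+1) (by omega) le_rfl)]
    exact ih (fun z h1 h2 => h z h1 (by omega))

lemma dropC_place (c : List String) (y : Nat)
    (h : ∃ z ≤ y, c.getD z "" ≠ "#") :
    ∃ p ≤ y, dropC c y = c.set p "#" ∧ c.getD p "" ≠ "#" ∧
      (∀ z, p < z → z ≤ y → c.getD z "" = "#") := by
  induction y with
  | zero =>
    obtain ⟨z, hz, hne⟩ := h
    interval_cases z
    exact ⟨0, le_rfl, rfl, hne, fun z h1 h2 => by omega⟩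
  | succ y ih =>
    by_cases hc : c.getD (y + 1) "" = "#"
    · obtain ⟨z, hz, hne⟩ := h
      have hzy : z ≤ y := by
        rcases Nat.lt_or_ge z (y+1) with h'|h'
        · omega
        · exfalso; have : z = y + 1 := by omega
          exact hne (this ▸ hc)
      obtain ⟨p, hp, heq, hpne, hsuf⟩ := ih ⟨z, hzy, hne⟩
      refine ⟨p, by omega, ?_, hpne, ?_⟩
      · simpa only [dropC, if_pos hc] using heq
      · intro w h1 h2
        rcases Nat.lt_or_ge w (y+1) with h'|h'
        · exact hsuf w h1 (by omega)
        · have : w = y + 1 := by omega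
          exact this ▸ hc
    · refine ⟨y + 1, le_rfl, ?_, hc, fun z h1 h2 => by omega⟩
      simp only [dropC, if_neg hc]

lemma count_set_ne (c : List String) (p : Nat) (hp : p < c.length)
    (h : c.getD p "" ≠ "#") : (c.set p "#").count "#" = c.count "#" + 1 := by
  induction c generalizing p with
  | nil => simp at hp
  | cons a c ih =>
    cases p with
    | zero =>
      simp only [List.getD_cons_zero] at h
      simp [List.set_cons_zero, List.count_cons, h]
    | succ p =>
      simp only [List.getD_cons_succ] at h
      simp only [List.length_cons, Nat.add_lt_add_iff_right] at hp
      simp [List.set_cons_succ, List.count_cons, ih p hp h]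
      omega

lemma take_set_of_le (c : List String) (p m : Nat) (v : String) (h : m ≤ p) :
    (c.set p v).take m = c.take m := by
  induction c generalizing p m with
  | nil => simp
  | cons a c ih =>
    cases p with
    | zero => interval_cases m <;> simp
    | succ p =>
      cases m with
      | zero => simp
      | succ m =>
        rw [List.set_cons_succ, List.take_succ_cons, List.take_succ_cons, ih p m (by omega)]

lemma count_le_len (c : List String) : c.count "#" ≤ c.length := List.count_le_length

lemma gravC_cons_ne (x : String) (c : List String) (hx : x ≠ "#") :
    gravC (x :: c) = x :: gravC c := by
  unfold gravC
  have hk : (x :: c).count "#" = c.count "#" := by simp [List.count_cons, hx]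
  have hle := count_le_len c
  rw [hk]
  have : (x :: c).length - c.count "#" = (c.length - c.count "#") + 1 := by
    simp only [List.length_cons]; omega
  rw [this, List.take_succ_cons]
  simp [fCell, hx]

lemma foldl_stepC_cons (L : List Nat) (x : String) (c : List String)
    (h : ∀ i ∈ L, i < c.length) :
    (L.map Nat.succ).foldl stepC (x :: c) = x :: L.foldl stepC c := by
  induction L generalizing c with
  | nil => rfl
  | cons i L ih =>
    simp only [List.map_cons, List.foldl_cons]
    rw [stepC_cons x c i (h i (by simp))]
    exact ih (stepC c i) (fun i' hi' => by rw [stepC_length]; exact h i' (by simp [hi']))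

lemma drop_all_count (c : List String) (p : Nat)
    (hsuf : ∀ z, p < z → z ≤ c.length - 1 → c.getD z "" = "#") (hp : p < c.length) :
    c.length - 1 - p ≤ c.count "#" := by
  have hdrop : ∀ b ∈ c.drop (p+1), b = "#" := by
    intro b hb
    obtain ⟨q, hq, hbq⟩ := List.getElem_of_mem hb
    rw [List.getElem_drop] at hbq
    have hlt : p + 1 + q < c.length := by
      have := hq; rw [List.length_drop] at this; omega
    have := hsuf (p + 1 + q) (by omega) (by omega)
    rw [List.getD_eq_getElem c "" hlt] at this
    rw [hbq] at this
    exact this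
  have hcnt : (c.drop (p+1)).count "#" = (c.drop (p+1)).length := by
    rw [List.count_eq_length]
    intro b hb; exact (hdrop b hb).symm
  have hsplit : c.count "#" = (c.take (p+1)).count "#" + (c.drop (p+1)).count "#" := by
    conv_lhs => rw [← List.take_append_drop (p+1) c]
    rw [List.count_append]
  rw [List.length_drop] at hcnt
  omega

lemma procC_eq_gravC (c : List String) : procC c = gravC c := by
  induction hn : c.length using Nat.strong_induction_on generalizing c with
  | _ n ih =>
  cases c with
  | nil => simp [procC, gravC]
  | cons x c =>
    subst hn
    have hrange : ∀ i ∈ List.range c.length, i < c.length := by simp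
    have hproc : procC (x :: c) =
        ((List.range c.length).map Nat.succ).foldl stepC (stepC (x :: c) 0) := by
      unfold procC
      rw [show (x :: c).length = c.length + 1 from rfl, List.range_succ_eq_map]
      rfl
    by_cases hx : x = "#"
    · subst hx
      have hstep0 : stepC ("#" :: c) 0 = dropC ("-" :: c) c.length := by
        unfold stepC
        rw [if_pos (by simp)]
        simp
      by_cases hall : c.count "#" = c.length
      · -- whole rest of the column is rocks: the dropped rock comes back to the top
        have hmem : ∀ b ∈ c, "#" = b := List.count_eq_length.mp hall
        have hdrop : dropC ("-" :: c) c.length = "#" :: c := by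
          rw [dropC_all_hash]
          · rfl
          · intro z h1 h2
            cases z with
            | zero => omega
            | succ z =>
              rw [List.getD_cons_succ, List.getD_eq_getElem c "" (by omega)]
              exact (hmem _ (List.getElem_mem _)).symm
        rw [hproc, hstep0, hdrop, foldl_stepC_cons _ _ _ hrange]
        have hc : (List.range c.length).foldl stepC c = gravC c := ih c.length (by simp) c rfl
        unfold procC at hc
        rw [hc]
        unfold gravC
        simp [hall, List.replicate_succ]
      · -- there is a free cell: the rock settles onto the lowest one
        have hk : c.count "#" < c.length := lt_of_le_of_ne (count_le_len c) hall
        have hpos : 0 < c.length := by omega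
        have hwit : ∃ z ≤ c.length - 1, c.getD z "" ≠ "#" := by
          by_contra hcon
          push_neg at hcon
          apply hall
          rw [List.count_eq_length]
          intro b hb
          obtain ⟨q, hq, hbq⟩ := List.getElem_of_mem hb
          have := hcon q (by omega)
          rw [List.getD_eq_getElem c "" hq, hbq] at this
          exact this.symm
        have hdrop : dropC ("-" :: c) c.length = "-" :: dropC c (c.length - 1) := by
          have hlen : c.length = (c.length - 1) + 1 := by omega
          calc dropC ("-" :: c) c.length
              = dropC ("-" :: c) ((c.length - 1) + 1) := by rw [← hlen]
            _ = "-" :: dropC c (c.length - 1) := dropC_cons _ _ _ hwit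
        obtain ⟨p, hp, heq, hpne, hsuf⟩ := dropC_place c (c.length - 1) hwit
        have hpc : p < c.length := by omega
        have hbound : c.length - 1 - p ≤ c.count "#" := drop_all_count c p hsuf hpc
        rw [hproc, hstep0, hdrop, heq,
          foldl_stepC_cons (List.range c.length) "-" (c.set p "#")
            (fun i hi => by rw [List.length_set]; exact hrange i hi)]
        have hlen2 : (c.set p "#").length = c.length := by simp
        have hfold : (List.range c.length).foldl stepC (c.set p "#") = gravC (c.set p "#") := by
          have := ih c.length (by simp) (c.set p "#") hlen2
          unfold procC at this
          rw [hlen2] at this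
          exact this
        rw [hfold]
        unfold gravC
        have hcnt : (c.set p "#").count "#" = c.count "#" + 1 := count_set_ne c p hpc hpne
        rw [hcnt, hlen2]
        have hc1 : (("#" : String) :: c).count "#" = c.count "#" + 1 := by simp [List.count_cons]
        rw [hc1]
        have ht1 : (("#" : String) :: c).length - (c.count "#" + 1) = (c.length - c.count "#" - 1) + 1 := by
          simp only [List.length_cons]; omega
        rw [ht1, List.take_cons]
        have ht2 : c.length - (c.count "#" + 1) = c.length - c.count "#" - 1 := by omega
        rw [ht2, take_set_of_le c p _ "#" (by omega)]
        · simp [fCell]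
        · omega
    · have hstep0 : stepC (x :: c) 0 = x :: c := stepC_noop _ _ (by simpa using hx)
      rw [hproc, hstep0, foldl_stepC_cons _ _ _ hrange]
      have hc : (List.range c.length).foldl stepC c = gravC c := ih c.length (by simp) c rfl
      unfold procC at hc
      rw [hc, gravC_cons_ne x c hx]

-- ---- grid ↔ column correspondence ----
def shapeEq (g h : List (List String)) : Prop :=
  g.length = h.length ∧ ∀ i, rowLen g i = rowLen h i

lemma shapeEq_refl (g : List (List String)) : shapeEq g g := ⟨rfl, fun _ => rfl⟩

lemma shapeEq_trans {g h k : List (List String)} (h1 : shapeEq g h) (h2 : shapeEq h k) :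
    shapeEq g k := ⟨h1.1.trans h2.1, fun i => (h1.2 i).trans (h2.2 i)⟩

def PreG (g : List (List String)) : Prop :=
  ∀ j, "#" ∈ colOf g j → ∀ i < g.length, j < rowLen g i

lemma pvCell_colOf (g : List (List String)) (i j : Nat) :
    pvCell g i j = (colOf g j).getD i "" := by
  unfold pvCell colOf
  rcases Nat.lt_or_ge i g.length with hi | hi
  · conv_rhs => rw [List.getD_eq_getElem _ "" (by simpa using hi), List.getElem_map]
    rw [List.getD_eq_getElem g [] hi]
  · conv_rhs => rw [List.getD_eq_default _ "" (by simpa using hi)]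
    rw [List.getD_eq_default g [] hi]
    simp

lemma colOf_length (g : List (List String)) (j : Nat) : (colOf g j).length = g.length := by
  simp [colOf]

lemma colOf_pvSet_ne (g : List (List String)) (i j j' : Nat) (v : String) (h : j' ≠ j) :
    colOf (pvSet g i j v) j' = colOf g j' := by
  induction g generalizing i with
  | nil => simp [pvSet, colOf]
  | cons r g ih =>
    cases i with
    | zero =>
      rw [pvSet_cons_zero]
      simp only [colOf, List.map_cons]
      congr 1
      exact getD_set_ne r j j' v (fun hc => h hc.symm)
    | succ i =>
      rw [pvSet_cons_succ]
      simp only [colOf, List.map_cons]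
      congr 1
      exact ih i

lemma colOf_pvSet_self (g : List (List String)) (i j : Nat) (v : String)
    (h : j < rowLen g i) : colOf (pvSet g i j v) j = (colOf g j).set i v := by
  induction g generalizing i with
  | nil => simp [pvSet, colOf]
  | cons r g ih =>
    cases i with
    | zero =>
      rw [pvSet_cons_zero]
      simp only [colOf, List.map_cons, List.set_cons_zero]
      congr 1
      exact getD_set_self r j v (by simpa [rowLen] using h)
    | succ i =>
      rw [pvSet_cons_succ]
      simp only [colOf, List.map_cons, List.set_cons_succ]
      congr 1
      exact ih i (by simpa [rowLen] using h)

lemma pvSet_shape (g : List (List String)) (i j : Nat) (v : String) :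
    shapeEq (pvSet g i j v) g := by
  constructor
  · simp [pvSet]
  · intro i'
    unfold rowLen
    induction g generalizing i i' with
    | nil => simp [pvSet]
    | cons r g ih =>
      cases i with
      | zero =>
        rw [pvSet_cons_zero]
        cases i' with
        | zero => simp
        | succ i' => simp
      | succ i =>
        rw [pvSet_cons_succ]
        cases i' with
        | zero => simp
        | succ i' =>
          rw [List.getD_cons_succ, List.getD_cons_succ]
          exact ih i i'

lemma dropA_colOf_ne (g : List (List String)) (j j' y : Nat) (h : j' ≠ j) :
    colOf (dropA g j y) j' = colOf g j' := by
  induction y with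
  | zero =>
    simp only [dropA]; split <;> exact colOf_pvSet_ne g 0 j j' "#" h
  | succ y ih =>
    simp only [dropA]; split
    · exact ih
    · exact colOf_pvSet_ne g (y+1) j j' "#" h

lemma dropA_shape (g : List (List String)) (j y : Nat) : shapeEq (dropA g j y) g := by
  induction y with
  | zero => simp only [dropA]; split <;> exact pvSet_shape g 0 j "#"
  | succ y ih =>
    simp only [dropA]; split
    · exact ih
    · exact pvSet_shape g (y+1) j "#"

lemma dropA_colOf_self (g : List (List String)) (j y : Nat)
    (h : ∀ y' ≤ y, j < rowLen g y') :
    colOf (dropA g j y) j = dropC (colOf g j) y := by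
  induction y with
  | zero =>
    simp only [dropA, dropC]
    rw [pvCell_colOf]
    split <;> exact colOf_pvSet_self g 0 j "#" (h 0 le_rfl)
  | succ y ih =>
    simp only [dropA, dropC]
    rw [pvCell_colOf]
    split
    · exact ih (fun y' hy' => h y' (by omega))
    · exact colOf_pvSet_self g (y+1) j "#" (h (y+1) le_rfl)

lemma stepA_colOf_ne (g : List (List String)) (i j j' : Nat) (h : j' ≠ j) :
    colOf (stepA g i j) j' = colOf g j' := by
  unfold stepA; split
  · rw [dropA_colOf_ne _ _ _ _ h, colOf_pvSet_ne _ _ _ _ _ h]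
  · rfl

lemma stepA_shape (g : List (List String)) (i j : Nat) : shapeEq (stepA g i j) g := by
  unfold stepA; split
  · exact shapeEq_trans (dropA_shape _ _ _) (pvSet_shape _ _ _ _)
  · exact shapeEq_refl g

lemma hash_mem_colOf (g : List (List String)) (i j : Nat) (hi : i < g.length)
    (hc : pvCell g i j = "#") : "#" ∈ colOf g j := by
  rw [pvCell_colOf] at hc
  have hlen : i < (colOf g j).length := by rw [colOf_length]; exact hi
  rw [List.getD_eq_getElem _ "" hlen] at hc
  rw [← hc]
  exact List.getElem_mem _

lemma stepA_colOf_self (g : List (List String)) (i j : Nat) (hp : PreG g)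
    (hi : i < g.length) : colOf (stepA g i j) j = stepC (colOf g j) i := by
  unfold stepA stepC
  rw [← pvCell_colOf]
  by_cases hc : pvCell g i j = "#"
  · rw [if_pos hc, if_pos hc]
    have hmem : "#" ∈ colOf g j := hash_mem_colOf g i j hi hc
    have hfull : ∀ i' < g.length, j < rowLen g i' := hp j hmem
    have hshape := pvSet_shape g i j "-"
    have hdrop := dropA_colOf_self (pvSet g i j "-") j (g.length - 1)
      (fun y' hy' => by
        rw [hshape.2 y']
        exact hfull y' (by omega))
    rw [hdrop, colOf_pvSet_self g i j "-" (hfull i hi), colOf_length]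
  · rw [if_neg hc, if_neg hc]

lemma stepC_mem_hash (c : List String) (i : Nat) (h : "#" ∈ stepC c i) : "#" ∈ c := by
  unfold stepC at h
  by_cases hc : c.getD i "" = "#"
  · have hlen : i < c.length := by
      by_contra hcon
      rw [List.getD_eq_default _ "" (by omega)] at hc
      exact absurd hc (by decide)
    rw [List.getD_eq_getElem _ "" hlen] at hc
    rw [← hc]
    exact List.getElem_mem _
  · rw [if_neg hc] at h; exact h

lemma stepA_pre (g : List (List String)) (i j : Nat) (hp : PreG g) (hi : i < g.length) :
    PreG (stepA g i j) := by
  intro j' hmem i' hi'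
  have hshape := stepA_shape g i j
  rw [hshape.2 i']
  rw [hshape.1] at hi'
  by_cases hj : j' = j
  · subst hj
    rw [stepA_colOf_self g i j' hp hi] at hmem
    exact hp j' (stepC_mem_hash _ _ hmem) i' hi'
  · rw [stepA_colOf_ne g i j j' hj] at hmem
    exact hp j' hmem i' hi'

-- inner loop over one row
lemma innerRow_spec (g : List (List String)) (i : Nat) (hp : PreG g) (hi : i < g.length)
    (L : List Nat) (hnd : L.Nodup) :
    shapeEq (L.foldl (fun a jj => stepA a i jj) g) g ∧
      PreG (L.foldl (fun a jj => stepA a i jj) g) ∧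
      ∀ j, colOf (L.foldl (fun a jj => stepA a i jj) g) j =
        if j ∈ L then stepC (colOf g j) i else colOf g j := by
  induction L generalizing g with
  | nil => exact ⟨shapeEq_refl g, hp, fun j => by simp⟩
  | cons jj L ih =>
    simp only [List.foldl_cons]
    have hnd' := hnd
    simp only [List.nodup_cons] at hnd'
    have hp' := stepA_pre g i jj hp hi
    have hshape := stepA_shape g i jj
    have hi' : i < (stepA g i jj).length := by rw [hshape.1]; exact hi
    obtain ⟨hs1, hp1, hc1⟩ := ih (stepA g i jj) hp' hi' hnd'.2
    refine ⟨shapeEq_trans hs1 hshape, hp1, fun j => ?_⟩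
    rw [hc1 j]
    by_cases hjL : j ∈ L
    · rw [if_pos hjL, if_pos (by simp [hjL])]
      have hne : j ≠ jj := fun hc => hnd'.1 (hc ▸ hjL)
      rw [stepA_colOf_ne g i jj j hne]
    · rw [if_neg hjL]
      by_cases hje : j = jj
      · subst hje
        rw [if_pos (by simp), stepA_colOf_self g i j hp hi]
      · rw [if_neg (by simp [hje, hjL]), stepA_colOf_ne g i jj j hje]

lemma outer_spec (I : List Nat) (g : List (List String)) (hp : PreG g)
    (hI : ∀ i ∈ I, i < g.length) :
    shapeEq (I.foldl (fun g' i =>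
        (List.range (g'.getD i []).length).foldl (fun g'' jj => stepA g'' i jj) g') g) g ∧
      ∀ j, colOf (I.foldl (fun g' i =>
        (List.range (g'.getD i []).length).foldl (fun g'' jj => stepA g'' i jj) g') g) j =
        I.foldl stepC (colOf g j) := by
  induction I generalizing g with
  | nil => exact ⟨shapeEq_refl g, fun j => rfl⟩
  | cons i I ih =>
    simp only [List.foldl_cons]
    have hi : i < g.length := hI i (by simp)
    obtain ⟨hs1, hp1, hc1⟩ := innerRow_spec g i hp hi
      (List.range (g.getD i []).length) (List.nodup_range)
    have hcol1 : ∀ j, colOf ((List.range (g.getD i []).length).foldl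
        (fun a jj => stepA a i jj) g) j = stepC (colOf g j) i := by
      intro j
      rw [hc1 j]
      by_cases hj : j ∈ List.range (g.getD i []).length
      · rw [if_pos hj]
      · rw [if_neg hj]
        simp only [List.mem_range, not_lt] at hj
        rw [stepC_noop]
        rw [← pvCell_colOf]
        unfold pvCell
        rw [List.getD_eq_default _ "" hj]
        decide
    obtain ⟨hs2, hc2⟩ := ih _ hp1 (fun i' hi' => by rw [hs1.1]; exact hI i' (by simp [hi']))
    refine ⟨shapeEq_trans hs2 hs1, fun j => ?_⟩
    rw [hc2 j]
    congr 1
    exact hcol1 j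

lemma switch_gravity_on_colOf (g : List (List String)) (hp : PreG g) :
    shapeEq (switch_gravity_on g) g ∧
      ∀ j, colOf (switch_gravity_on g) j = procC (colOf g j) := by
  obtain ⟨hs, hc⟩ := outer_spec (List.range g.length) g hp (by simp)
  refine ⟨hs, fun j => ?_⟩
  unfold switch_gravity_on
  rw [hc j]
  unfold procC
  rw [colOf_length]

-- ---- B characterised pointwise ----
-- per-row contribution of column index j to the counter
def hashC : List String → Int → Int → Int
  | [], _, _ => 0
  | x :: r, s, j => (if x = "#" ∧ j = s then 1 else 0) + hashC r (s + 1) j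

lemma inner_cnt (row : List String) (d : PySem.Dict Int Int) (s j : Int) :
    ((PySem.List.enumerate row s).foldl (fun d' p =>
        if p.2 = "#" then d'.modify p.1 0 (· + 1) else d') d).getD j 0
      = d.getD j 0 + hashC row s j := by
  induction row generalizing d s with
  | nil => simp [PySem.List.enumerate_nil, hashC]
  | cons x r ih =>
    rw [PySem.List.enumerate_cons]
    simp only [List.foldl_cons, hashC]
    by_cases hx : x = "#"
    · rw [if_pos hx, ih, PySem.Dict.getD_modify]
      by_cases hj : j = s
      · subst hj
        rw [if_pos rfl, if_pos ⟨hx, rfl⟩]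
        ring
      · rw [if_neg hj, if_neg (by tauto)]
        ring
    · rw [if_neg hx, ih, if_neg (by tauto)]
      ring

lemma hashC_lt (row : List String) (s j : Int) (h : j < s) : hashC row s j = 0 := by
  induction row generalizing s with
  | nil => rfl
  | cons x r ih =>
    simp only [hashC]
    rw [if_neg (by rintro ⟨_, rfl⟩; omega), ih (s+1) (by omega)]
    norm_num

lemma hashC_spec (row : List String) (s : Int) (jn : Nat) :
    hashC row (s) (s + jn) = if row.getD jn "" = "#" then 1 else 0 := by
  induction row generalizing s jn with
  | nil => simp [hashC]
  | cons x r ih =>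
    cases jn with
    | zero =>
      simp only [hashC, Nat.cast_zero, add_zero, List.getD_cons_zero]
      rw [hashC_lt r (s+1) s (by omega)]
      by_cases hx : x = "#"
      · simp [hx]
      · simp [hx]
    | succ jn =>
      simp only [hashC, List.getD_cons_succ]
      rw [if_neg (by rintro ⟨_, h⟩; omega)]
      have hcast : s + (↑(jn + 1) : Int) = (s + 1) + ↑jn := by push_cast; ring
      rw [hcast, ih (s+1) jn]
      norm_num

lemma count_colOf (lst : List (List String)) (jn : Nat) :
    ((colOf lst jn).count "#" : Int) = (lst.map (fun row => hashC row 0 (jn : Int))).sum := by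
  induction lst with
  | nil => simp [colOf]
  | cons r lst ih =>
    simp only [colOf, List.map_cons, List.count_cons, List.sum_cons]
    have : hashC r 0 (jn : Int) = if r.getD jn "" = "#" then 1 else 0 := by
      have := hashC_spec r 0 jn
      simpa using this
    rw [this]
    unfold colOf at ih
    by_cases hr : r.getD jn "" = "#"
    · rw [if_pos (by rw [List.getD_eq_getElem?_getD] at hr; simp [hr] :
          (r.getD jn "" == "#") = true), if_pos hr]
      push_cast
      rw [ih]
      ring
    · rw [if_neg (by rw [List.getD_eq_getElem?_getD] at hr; simp [hr]), if_neg hr]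
      push_cast
      rw [ih]
      ring

lemma cnt_getD (lst : List (List String)) (jn : Nat) :
    (pvCntB lst).getD (jn : Int) 0 = ((colOf lst jn).count "#" : Int) := by
  unfold pvCntB
  rw [count_colOf]
  have hgen : ∀ (d : PySem.Dict Int Int),
      (lst.foldl (fun d row => (PySem.List.enumerate row).foldl (fun d' p =>
        if p.2 = "#" then d'.modify p.1 0 (· + 1) else d') d) d).getD (jn : Int) 0
      = d.getD (jn : Int) 0 + (lst.map (fun row => hashC row 0 (jn : Int))).sum := by
    intro d
    induction lst generalizing d with
    | nil => simp
    | cons r lst ih =>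
      simp only [List.foldl_cons, List.map_cons, List.sum_cons]
      rw [ih, inner_cnt]
      ring
  rw [hgen]
  simp [PySem.Dict.getD, PySem.Dict.get?, PySem.Dict.empty]

lemma gravC_getD (c : List String) (i : Nat) (hi : i < c.length) :
    (gravC c).getD i "" = if i < c.length - c.count "#" then fCell (c.getD i "") else "#" := by
  unfold gravC
  have hk := count_le_len c
  have hlen1 : ((c.take (c.length - c.count "#")).map fCell).length = c.length - c.count "#" := by
    simp only [List.length_map, List.length_take]
    omega
  have hlen2 : ((c.take (c.length - c.count "#")).map fCell
      ++ List.replicate (c.count "#") "#").length = c.length := by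
    simp only [List.length_append, List.length_map, List.length_take, List.length_replicate]
    omega
  rw [List.getD_eq_getElem _ "" (by omega)]
  by_cases hcase : i < c.length - c.count "#"
  · rw [if_pos hcase]
    rw [List.getElem_append_left (by omega), List.getElem_map, List.getElem_take,
      List.getD_eq_getElem c "" (by omega)]
  · rw [if_neg hcase]
    rw [List.getElem_append_right (by omega), List.getElem_replicate]

-- ---- final assembly ----
lemma pre_implies_preG (lst : List (List String)) (h : Pre_switch_gravity_on lst) : PreG lst := by
  intro j hmem i hi
  unfold colOf at hmem
  obtain ⟨r, hr, hrj⟩ := List.mem_map.mp hmem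
  have hjr : j < r.length := by
    by_contra hcon
    rw [List.getD_eq_default _ "" (by omega)] at hrj
    exact absurd hrj (by decide)
  have := h r hr j hjr hrj (lst.getD i []) ?_
  · exact this
  · rw [List.getD_eq_getElem lst [] hi]
    exact List.getElem_mem _

-- ===== VERDICT (by name: the statement is the Claim_ definition above) =====
theorem switch_gravity_on_spec : Claim_equal_switch_gravity_on := by
  intro lst _ hpre
  unfold Spec_switch_gravity_on
  have hG := pre_implies_preG lst hpre
  obtain ⟨⟨hlen, hrow⟩, hcol⟩ := switch_gravity_on_colOf lst hG
  have hblen : (switch_gravity_on_alt lst).length = lst.length := by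
    unfold switch_gravity_on_alt
    simp [PySem.List.length_enumerate]
  apply List.ext_getElem (by omega)
  intro i hi hib
  have hin : i < lst.length := by omega
  have hrowA : (switch_gravity_on lst)[i].length = lst[i].length := by
    have h1 := hrow i
    unfold rowLen at h1
    rw [List.getD_eq_getElem _ [] hi, List.getD_eq_getElem lst [] hin] at h1
    exact h1
  have hrowB : (switch_gravity_on_alt lst)[i] =
      (PySem.List.enumerate lst[i] 0).map (fun p =>
        if (lst.length : Int) - (pvCntB lst).getD p.1 0 ≤ (i : Int) then "#"
        else if p.2 = "#" then "-" else p.2) := by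
    unfold switch_gravity_on_alt
    rw [List.getElem_map, PySem.List.getElem_enumerate]
    simp
  apply List.ext_getElem
  · rw [hrowA, hrowB]
    simp [PySem.List.length_enumerate]
  intro j hj hjb
  have hjn : j < lst[i].length := by rw [hrowA] at hj; exact hj
  -- right-hand side: B's closed form
  have hB : (switch_gravity_on_alt lst)[i][j] =
      (if (lst.length : Int) - (pvCntB lst).getD (j : Int) 0 ≤ (i : Int) then "#"
        else if lst[i][j] = "#" then "-" else lst[i][j]) := by
    have : ((PySem.List.enumerate lst[i] 0).map (fun p =>
        if (lst.length : Int) - (pvCntB lst).getD p.1 0 ≤ (i : Int) then "#"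
        else if p.2 = "#" then "-" else p.2))[j]'(by simpa [PySem.List.length_enumerate] using hjn)
        = (if (lst.length : Int) - (pvCntB lst).getD (j : Int) 0 ≤ (i : Int) then "#"
          else if lst[i][j] = "#" then "-" else lst[i][j]) := by
      rw [List.getElem_map, PySem.List.getElem_enumerate]
      simp
    simp only [hrowB]
    exact this
  -- left-hand side: A's settled grid, read through the column view
  set c := colOf lst j with hc
  have hclen : c.length = lst.length := colOf_length lst j
  have hA : (switch_gravity_on lst)[i][j] =
      (if i < c.length - c.count "#" then fCell (c.getD i "") else "#") := by
    have h1 : (switch_gravity_on lst)[i][j] = pvCell (switch_gravity_on lst) i j := by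
      unfold pvCell
      rw [List.getD_eq_getElem _ [] hi, List.getD_eq_getElem _ "" hj]
    rw [h1, pvCell_colOf, hcol j, procC_eq_gravC, gravC_getD]
    rw [colOf_length]
    exact hin
  have hcell : c.getD i "" = lst[i][j] := by
    rw [hc, ← pvCell_colOf]
    unfold pvCell
    rw [List.getD_eq_getElem lst [] hin, List.getD_eq_getElem _ "" hjn]
  have hcnt : (pvCntB lst).getD (j : Int) 0 = (c.count "#" : Int) := cnt_getD lst j
  have hkle : c.count "#" ≤ lst.length := by
    have := count_le_len c
    omega
  rw [hA, hB, hcnt, hcell]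
  by_cases hcase : i < c.length - c.count "#"
  · rw [if_pos hcase, if_neg (by push_cast; omega)]
    unfold fCell
    rfl
  · rw [if_neg hcase, if_pos (by rw [hclen] at hcase; push_cast; omega)]
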